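-- pv_equiv track=rewrite | github.com/chrismcclurg/vr-shooter-des | src/rl/envs/shooter_env.py | _last_unique
-- ===== SOURCE A (Python) =====
-- def _last_unique(seq, n=3):
--     """
--     Return the last n unique non-None elements from a deque or list.
--     If fewer than n valid entries exist, pad with the most recent valid one.
--     """
--     seen = set()
--     uniq = []
--
--     # Iterate backward, skipping None placeholders
--     for x in reversed(seq):
--         if x is None:
--             continue
--         if x not in seen:
--             seen.add(x)
--             uniq.append(x)
--         if len(uniq) == n:
--             break
--
--     # If we ran out of unique nodes, pad with last valid
--     if len(uniq) == 0:
--         # still empty — no valid data at all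
--         return [0] * n  # or some sentinel index
--     while len(uniq) < n:
--         uniq.append(uniq[-1])
--
--     return list(reversed(uniq))  # return oldest → newest
-- ===== SOURCE B (Python) =====
-- def _last_unique(seq, n=3):
--     # forward pass: keep last occurrences in order (move-to-end), then slice/pad
--     uniq = []
--     for x in seq:
--         if x is None:
--             continue
--         if x in uniq:
--             uniq.remove(x)
--         uniq.append(x)
--     if not uniq:
--         return [0] * n
--     sel = uniq[-n:]
--     return [sel[0]] * (n - len(sel)) + sel
-- ===== Notes on version B (the rewrite author's own statement) =====
-- stated objective: alternative
-- what changed: A scans the sequence backward collecting first-seen elements with a set and an early break, then pads at the end and reverses; B scans forward keeping a move-to-end list of last occurrences, slices its last n entries and left-pads with the oldest selected element.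
-- outside the precondition, e.g. on _last_unique([1, 2], -1): A returns [1, 2], B returns [2]; on _last_unique([1], -1): A returns [1], B raises IndexError
import Mathlib
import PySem

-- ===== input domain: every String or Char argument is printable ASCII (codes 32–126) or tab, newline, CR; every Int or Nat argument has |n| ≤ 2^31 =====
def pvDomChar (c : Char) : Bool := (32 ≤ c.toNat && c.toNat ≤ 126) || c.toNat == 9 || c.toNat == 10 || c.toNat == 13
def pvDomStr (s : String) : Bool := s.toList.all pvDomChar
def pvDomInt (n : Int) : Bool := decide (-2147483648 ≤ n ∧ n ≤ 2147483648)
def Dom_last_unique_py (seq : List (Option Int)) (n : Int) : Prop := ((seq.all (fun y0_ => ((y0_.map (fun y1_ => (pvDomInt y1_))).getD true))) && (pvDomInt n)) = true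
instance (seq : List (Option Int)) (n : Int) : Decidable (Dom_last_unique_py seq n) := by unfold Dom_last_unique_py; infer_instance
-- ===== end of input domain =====

-- B replaces A's backward scan (set + early break + end-padding + reverse) by a forward
-- move-to-end pass keeping last occurrences in order, then a tail slice with front padding;
-- objective: alternative decomposition, not speed.

-- ===== PORT A =====
-- for x in reversed(seq): skip None; if new, record in seen and append to uniq; break at len n
def lastUniqueLoopA (l : List (Option Int)) (seen : PySem.Set Int) (uniq : List Int) (n : Int) : List Int :=
  match l with
  | [] => uniq
  | none :: rest => lastUniqueLoopA rest seen uniq n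
  | some x :: rest =>
    let p := if PySem.Set.contains seen x then (seen, uniq)
             else (PySem.Set.add seen x, uniq ++ [x])
    if ((p.2.length : Int) == n) then p.2 else lastUniqueLoopA rest p.1 p.2 n

-- while len(uniq) < n: uniq.append(uniq[-1])
def lastUniquePad (uniq : List Int) (n : Int) : List Int :=
  if (uniq.length : Int) < n then
    lastUniquePad (uniq ++ [(PySem.List.pyGet? uniq (-1)).getD 0]) n
  else uniq
termination_by (n - uniq.length).toNat
decreasing_by simp only [List.length_append, List.length_cons, List.length_nil]; omega

def last_unique_py (seq : List (Option Int)) (n : Int) : List Int :=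
  let uniq := lastUniqueLoopA seq.reverse PySem.Set.empty [] n
  if uniq.length == 0 then List.replicate n.toNat 0
  else (lastUniquePad uniq n).reverse

-- ===== PORT B =====
-- for x in seq: skip None; if x in uniq: uniq.remove(x); uniq.append(x)  (move-to-end)
def lastUniqueLoopB (l : List (Option Int)) (uniq : List Int) : List Int :=
  match l with
  | [] => uniq
  | none :: rest => lastUniqueLoopB rest uniq
  | some x :: rest =>
    let u := if uniq.contains x then (PySem.List.remove? uniq x).getD uniq else uniq
    lastUniqueLoopB rest (u ++ [x])

def last_unique_py_alt (seq : List (Option Int)) (n : Int) : List Int :=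
  let uniq := lastUniqueLoopB seq []
  if uniq.isEmpty then List.replicate n.toNat 0
  else
    let sel := PySem.List.slice uniq (some (-n)) none
    List.replicate (n - (sel.length : Int)).toNat ((PySem.List.pyGet? sel 0).getD 0) ++ sel

-- ===== PRECONDITION & SPEC =====
-- Pre_ restricts to the natural domain n ≥ 0 (a count of elements), except when seq has no
-- valid entry (then both trivially return []): for negative n A still returns a value (its
-- break/pad conditions never fire, so it returns all uniques) while B's tail slice drops
-- elements or raises — negative counts are outside the function's purpose.
def Pre_last_unique_py (seq : List (Option Int)) (n : Int) : Prop :=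
  0 ≤ n ∨ ∀ x ∈ seq, x = none
instance (seq : List (Option Int)) (n : Int) : Decidable (Pre_last_unique_py seq n) := by unfold Pre_last_unique_py; infer_instance
def pvWitness_last_unique_py : List (Option Int) × Int := ([some 1, none, some 2, some 1], 3)

def Spec_last_unique_py (seq : List (Option Int)) (n : Int) (out : List Int) : Prop := out = last_unique_py_alt seq n
instance (seq : List (Option Int)) (n : Int) (out : List Int) : Decidable (Spec_last_unique_py seq n out) := by unfold Spec_last_unique_py; infer_instance

-- ===== CLAIM (what is proved, stated in full; the proofs are below) =====
def Claim_equal_last_unique_py : Prop := ∀ (seq : List (Option Int)) (n : Int), Dom_last_unique_py seq n → Pre_last_unique_py seq n → Spec_last_unique_py seq n (last_unique_py seq n)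

-- ===== LEMMAS AND PROOFS =====

-- pure versions of the two loops over the non-None elements
def aF (l : List Int) (seen uniq : List Int) (n : Int) : List Int :=
  match l with
  | [] => uniq
  | x :: rest =>
    let p := if x ∈ seen then (seen, uniq) else (seen ++ [x], uniq ++ [x])
    if ((p.2.length : Int) = n) then p.2 else aF rest p.1 p.2 n

def bF (l : List Int) (uniq : List Int) : List Int :=
  match l with
  | [] => uniq
  | x :: rest => bF rest ((if x ∈ uniq then uniq.erase x else uniq) ++ [x])

-- first-occurrence dedup relative to a seen list
def fdRef (l : List Int) (seen : List Int) : List Int :=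
  match l with
  | [] => []
  | x :: rest => if x ∈ seen then fdRef rest seen else x :: fdRef rest (seen ++ [x])

-- last-occurrence dedup
def ldRef (l : List Int) : List Int :=
  match l with
  | [] => []
  | x :: rest => if x ∈ rest then ldRef rest else x :: ldRef rest

theorem skipA (l : List (Option Int)) (seen : PySem.Set Int) (uniq : List Int) (n : Int) :
    lastUniqueLoopA l seen uniq n = aF (l.filterMap id) seen uniq n := by
  induction l generalizing seen uniq with
  | nil => rfl
  | cons h t ih =>
    cases h with
    | none => simpa [lastUniqueLoopA, List.filterMap_cons] using ih seen uniq
    | some x =>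
      by_cases hc : x ∈ seen <;>
        simp [lastUniqueLoopA, aF, hc, PySem.Set.contains_eq_listContains, ih, beq_iff_eq]

theorem skipB (l : List (Option Int)) (uniq : List Int) :
    lastUniqueLoopB l uniq = bF (l.filterMap id) uniq := by
  induction l generalizing uniq with
  | nil => rfl
  | cons h t ih =>
    cases h with
    | none => simpa [lastUniqueLoopB, List.filterMap_cons] using ih uniq
    | some x =>
      by_cases hc : x ∈ uniq <;>
        simp [lastUniqueLoopB, bF, hc, ih, PySem.List.remove?_eq_some_erase]

theorem aF_take (l : List Int) (seen uniq : List Int) (n : Int) (h : (uniq.length : Int) < n) :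
    aF l seen uniq n = uniq ++ (fdRef l seen).take (n.toNat - uniq.length) := by
  induction l generalizing seen uniq with
  | nil => simp [aF, fdRef]
  | cons x rest ih =>
    by_cases hc : x ∈ seen
    · have hne : ¬ ((uniq.length : Int) = n) := by omega
      simp [aF, fdRef, hc, hne, ih seen uniq h]
    · by_cases heq : ((uniq.length : Int) + 1 = n)
      · have h1 : n.toNat - uniq.length = 1 := by omega
        simp [aF, fdRef, hc, heq, h1]
      · have h' : ((uniq ++ [x]).length : Int) < n := by simp; omega
        obtain ⟨m, hm⟩ : ∃ m, n.toNat - uniq.length = m + 1 := ⟨n.toNat - uniq.length - 1, by omega⟩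
        have hm' : n.toNat - (uniq ++ [x]).length = m := by simp; omega
        simp only [aF, fdRef, hc, ite_false]
        rw [ih _ _ h', hm', hm, List.take_succ_cons, List.append_assoc, List.singleton_append]
        rw [if_neg (by simp; omega)]

theorem aF_over (l : List Int) (seen uniq : List Int) (n : Int) (h : n < (uniq.length : Int)) :
    aF l seen uniq n = uniq ++ fdRef l seen := by
  induction l generalizing seen uniq with
  | nil => simp [aF, fdRef]
  | cons x rest ih =>
    by_cases hc : x ∈ seen
    · have hne : ¬ ((uniq.length : Int) = n) := by omega
      simp [aF, fdRef, hc, hne, ih seen uniq h]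
    · have h' : n < ((uniq ++ [x]).length : Int) := by simp; omega
      have hne : ¬ (((uniq ++ [x]).length : Int) = n) := by simp; omega
      simp only [aF, fdRef, hc, if_false]
      rw [if_neg (by simpa using hne), ih _ _ h', List.append_assoc, List.singleton_append]

theorem aF_zero (l : List Int) : aF l [] [] 0 = fdRef l [] := by
  cases l with
  | nil => rfl
  | cons x rest =>
    have h : (0 : Int) < (([x] : List Int).length : Int) := by simp
    simp [aF, fdRef, aF_over rest [x] [x] 0 h]

theorem fd_filter (l : List Int) (s : List Int) :
    fdRef l s = (fdRef l []).filter (fun a => decide (a ∉ s)) := by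
  induction l generalizing s with
  | nil => simp [fdRef]
  | cons x rest ih =>
    have h0 : fdRef (x :: rest) [] = x :: fdRef rest [x] := by
      rw [fdRef]
      simp
    rw [h0, List.filter_cons]
    by_cases hc : x ∈ s
    · rw [fdRef, if_pos hc, show (decide (x ∉ s)) = false by simp [hc]]
      rw [if_neg (by simp), ih [x], List.filter_filter, ih s]
      exact List.filter_congr (fun a _ => by by_cases hax : a = x <;> simp [hax, hc])
    · rw [fdRef, if_neg hc, show (decide (x ∉ s)) = true by simp [hc]]
      rw [if_pos rfl, ih [x], List.filter_filter, ih (s ++ [x])]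
      congr 1
      exact List.filter_congr (fun a _ => by by_cases hax : a = x <;> simp [hax, hc])

theorem ld_concat (t : List Int) (x : Int) :
    ldRef (t ++ [x]) = (ldRef t).filter (fun b => b != x) ++ [x] := by
  induction t with
  | nil => simp [ldRef]
  | cons y t' ih =>
    by_cases hyx : y = x
    · subst hyx
      have hc : y ∈ t' ++ [y] := by simp
      rw [List.cons_append, ldRef]
      simp only [hc, if_true, ih, ldRef]
      by_cases hyt : y ∈ t' <;> simp [hyt]
    · have hc : (y ∈ t' ++ [x]) ↔ y ∈ t' := by simp [hyx]
      rw [List.cons_append, ldRef]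
      by_cases hyt : y ∈ t'
      · simp only [hc, hyt, if_true, ih, ldRef]
      · simp only [hc, hyt, if_false, ih, ldRef]
        simp [hyx]

theorem fd_ld (m : List Int) : fdRef m [] = (ldRef m.reverse).reverse := by
  induction m with
  | nil => simp [fdRef, ldRef]
  | cons x m ih =>
    rw [fdRef]
    simp only [List.not_mem_nil, if_false, List.nil_append]
    rw [fd_filter m [x], ih, List.reverse_cons, ld_concat, List.reverse_append,
      List.reverse_singleton, List.filter_reverse]
    congr 2
    exact List.filter_congr (fun a _ => by by_cases hax : a = x <;> simp [hax])

theorem ld_of_nodup (l : List Int) (h : l.Nodup) : ldRef l = l := by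
  induction l with
  | nil => rfl
  | cons x rest ih =>
    rw [ldRef]
    have hx : ¬ x ∈ rest := (List.nodup_cons.mp h).1
    simp [hx, ih (List.nodup_cons.mp h).2]

theorem ld_absorb (acc : List Int) (x : Int) (l : List Int) :
    ldRef (acc ++ x :: l) = ldRef (acc.filter (fun b => b != x) ++ x :: l) := by
  induction acc with
  | nil => rfl
  | cons y acc' ih =>
    by_cases hyx : y = x
    · subst hyx
      have hc : y ∈ acc' ++ y :: l := by simp
      rw [List.cons_append, ldRef, if_pos hc, ih, List.filter_cons]
      simp
    · have hc : (y ∈ acc' ++ x :: l) ↔ (y ∈ acc'.filter (fun b => b != x) ++ x :: l) := by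
        simp [hyx]
      rw [List.cons_append, List.filter_cons]
      rw [if_pos (by simp [hyx])]
      rw [List.cons_append, ldRef]
      conv_rhs => rw [ldRef]
      by_cases hy : y ∈ acc' ++ x :: l
      · rw [if_pos hy, if_pos (hc.mp hy), ih]
      · rw [if_neg hy, if_neg (fun h => hy (hc.mpr h)), ih]

theorem bF_ld (l : List Int) (acc : List Int) (h : acc.Nodup) : bF l acc = ldRef (acc ++ l) := by
  induction l generalizing acc with
  | nil => simpa [bF] using (ld_of_nodup acc h).symm
  | cons x rest ih =>
    have hfe : (if x ∈ acc then acc.erase x else acc) = acc.filter (fun b => b != x) := by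
      by_cases hc : x ∈ acc
      · simp [hc, List.Nodup.erase_eq_filter h]
      · simp only [hc, if_false]
        exact (List.filter_eq_self.mpr (fun b hb => by
          simp only [bne_iff_ne, ne_eq]
          rintro rfl
          exact hc hb)).symm
    have hnd : ((if x ∈ acc then acc.erase x else acc) ++ [x]).Nodup := by
      rw [hfe]
      refine List.Nodup.append (List.Nodup.filter _ h) (List.nodup_singleton x) ?_
      intro a ha hax
      rw [List.mem_singleton] at hax
      subst hax
      have := (List.mem_filter.mp ha).2
      simp at this
    rw [bF, ih _ hnd, hfe, List.append_assoc, List.singleton_append, ← ld_absorb]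

theorem pad_eq (u : List Int) (n : Int) (h : u ≠ []) :
    lastUniquePad u n = u ++ List.replicate (n.toNat - u.length) (u.getLastD 0) := by
  induction u using lastUniquePad.induct (n := n) with
  | case1 u hlt ih =>
    rw [lastUniquePad, if_pos hlt]
    rw [ih (by simp)]
    rw [PySem.List.pyGet?_neg_one]
    have hd : (u ++ [u.getLast?.getD 0]).getLastD 0 = u.getLastD 0 := by
      rw [List.getLastD_concat, List.getLastD_eq_getLast?]
    rw [hd]
    obtain ⟨m, hm⟩ : ∃ m, n.toNat - u.length = m + 1 :=
      ⟨n.toNat - u.length - 1, by omega⟩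
    have hm' : n.toNat - (u ++ [u.getLast?.getD 0]).length = m := by simp; omega
    rw [hm', hm, List.append_assoc, List.singleton_append, List.replicate_succ,
      List.getLastD_eq_getLast?]
  | case2 u hlt =>
    rw [lastUniquePad, if_neg hlt]
    have : n.toNat - u.length = 0 := by omega
    simp [this]

-- ===== VERDICT (by name: the statement is the Claim_ definition above) =====
theorem last_unique_py_spec : Claim_equal_last_unique_py := by
  unfold Claim_equal_last_unique_py
  intro seq n _ hn
  unfold Pre_last_unique_py at hn
  unfold Spec_last_unique_py
  simp only [last_unique_py, last_unique_py_alt]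
  rw [skipA, skipB, List.filterMap_reverse,
    show (PySem.Set.empty : PySem.Set Int) = ([] : List Int) from rfl]
  rcases hn with hn | hnone
  swap
  · -- no valid entry at all: both sides return [0] * n
    have hfl : seq.filterMap id = [] := by
      rw [List.filterMap_eq_nil_iff]
      intro a ha
      simpa using hnone a ha
    rw [hfl]
    simp [aF, bF]
  rw [bF_ld _ _ List.nodup_nil, List.nil_append]
  have hLrev : fdRef (seq.filterMap id).reverse [] = (ldRef (seq.filterMap id)).reverse := by
    rw [fd_ld, List.reverse_reverse]
  set L := ldRef (seq.filterMap id) with hL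
  rcases eq_or_lt_of_le hn with hn0 | hpos
  · -- n = 0 : A never breaks nor pads; B slices the whole list and pads nothing
    obtain rfl : n = 0 := hn0.symm
    rw [aF_zero, hLrev]
    by_cases hLnil : L = []
    · simp [hLnil]
    · rw [if_neg (by simp [hLnil]), if_neg (by simp [hLnil])]
      rw [lastUniquePad, if_neg (by omega), List.reverse_reverse]
      rw [neg_zero, PySem.List.slice_zero_start, PySem.List.slice_none_none]
      rw [show ((0:Int) - (L.length:Int)).toNat = 0 from by omega]
      simp
  · -- 0 < n
    have hk : n = (n.toNat : Int) := (Int.toNat_of_nonneg hn).symm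
    rw [aF_take _ _ _ _ (by simp; omega), hLrev, List.nil_append, List.length_nil,
      Nat.sub_zero]
    by_cases hLnil : L = []
    · simp [hLnil]
    · set uA := List.take n.toNat L.reverse with huAdef
      have hL0 : 0 < L.length := List.length_pos_iff.mpr hLnil
      have huAlen : uA.length = min n.toNat L.length := by
        rw [huAdef, List.length_take, List.length_reverse]
      have huA : uA ≠ [] := by
        intro hnil
        rw [hnil] at huAlen
        simp at huAlen
        omega
      have hsel : PySem.List.slice L (some (-n)) none = uA.reverse := by
        rw [hk, PySem.List.slice_from_neg_natCast L n.toNat (by omega), huAdef,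
          List.take_reverse, List.reverse_reverse]
      rw [if_neg (by simp only [beq_iff_eq, List.length_eq_zero_iff]; exact huA),
        if_neg (by simp only [List.isEmpty_iff]; exact hLnil)]
      rw [pad_eq _ _ huA, List.reverse_append, List.reverse_replicate, hsel]
      have hd : (PySem.List.pyGet? uA.reverse 0).getD 0 = uA.getLastD 0 := by
        rw [PySem.List.pyGet?_zero, ← List.head?_eq_getElem?, List.head?_reverse,
          List.getLastD_eq_getLast?]
      rw [hd]
      have hcnt : (n - (uA.reverse.length : Int)).toNat = n.toNat - uA.length := by
        rw [List.length_reverse]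
        omega
      rw [hcnt]
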